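-- pv_equiv track=rewrite | github.com/rvugts/ios-contact-deduplication | src/vcard_parser.py | _split_vcard_blocks
-- ===== SOURCE A (Python) =====
-- from typing import Any, Dict, List, Optional, Tuple
--
-- def _normalize_line_endings(content: str) -> str:
--     """Normalize line endings to Unix format."""
--     return content.replace('\r\n', '\n')
--
-- def _is_vcard_begin(line: str) -> bool:
--     """Check if line is a vCard BEGIN marker."""
--     return 'BEGIN:VCARD' in line.strip().upper()
--
-- def _is_vcard_end(line: str) -> bool:
--     """Check if line is a vCard END marker."""
--     return 'END:VCARD' in line.strip().upper()
--
-- def _split_vcard_blocks(content: str) -> List[str]: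
--     """
--     Split vCard content into individual vCard blocks.
--
--     :param content: Full vCard file content
--     :return: List of individual vCard block strings
--     """
--     blocks = []
--     current_block = []
--     in_block = False
--
--     lines = _normalize_line_endings(content).split('\n')
--
--     for line in lines:
--         if _is_vcard_begin(line):
--             if in_block and current_block:
--                 blocks.append('\n'.join(current_block))
--             current_block = [line]
--             in_block = True
--         elif in_block:
--             current_block.append(line)
--             if _is_vcard_end(line):
--                 blocks.append('\n'.join(current_block))
--                 current_block = []
--                 in_block = False
--
--     if in_block and current_block:
--         blocks.append('\n'.join(current_block))
--
--     return blocks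
-- ===== SOURCE B (Python) =====
-- from typing import List
--
-- def _is_begin_line(line: str) -> bool:
--     return 'BEGIN:VCARD' in line.strip().upper()
--
-- def _is_end_line(line: str) -> bool:
--     return 'END:VCARD' in line.strip().upper()
--
-- def _split_vcard_blocks(content: str) -> List[str]:
--     """Index-scan re-implementation: for each BEGIN line, slice forward to
--     the END line (inclusive) or the next BEGIN line (exclusive)."""
--     lines = content.replace('\r\n', '\n').split('\n')
--     n = len(lines)
--     blocks = []
--     for i in range(n):
--         if _is_begin_line(lines[i]):
--             j = i + 1
--             while j < n and not _is_begin_line(lines[j]):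
--                 if _is_end_line(lines[j]):
--                     j += 1
--                     break
--                 j += 1
--             blocks.append('\n'.join(lines[i:j]))
--     return blocks
-- ===== Notes on version B (the rewrite author's own statement) =====
-- stated objective: alternative
-- what changed: Replaces A's stateful single pass (in_block flag and mutable current_block accumulator) by a BEGIN-anchored index scan: for each BEGIN line, scan forward to the END line (inclusive) or the next BEGIN (exclusive) and slice the block out directly.
import Mathlib
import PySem

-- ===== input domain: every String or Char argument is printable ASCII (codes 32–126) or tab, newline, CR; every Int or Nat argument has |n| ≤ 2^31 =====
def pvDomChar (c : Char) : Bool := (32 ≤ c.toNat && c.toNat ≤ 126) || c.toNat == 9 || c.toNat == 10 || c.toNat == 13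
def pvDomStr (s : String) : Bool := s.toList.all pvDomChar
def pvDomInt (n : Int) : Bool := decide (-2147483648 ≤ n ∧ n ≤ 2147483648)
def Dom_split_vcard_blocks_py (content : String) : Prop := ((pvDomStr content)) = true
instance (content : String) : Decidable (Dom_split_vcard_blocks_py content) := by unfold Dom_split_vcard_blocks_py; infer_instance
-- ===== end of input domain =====

-- B replaces A's in_block/current state machine by a BEGIN-anchored forward index scan (alternative decomposition, same cost).

-- ===== PORT A =====
-- _is_vcard_begin / _is_vcard_end
def pvIsBeg (line : String) : Bool :=
  PySem.Str.isIn "BEGIN:VCARD" (PySem.Str.upper (PySem.Str.strip line))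
def pvIsEnd (line : String) : Bool :=
  PySem.Str.isIn "END:VCARD" (PySem.Str.upper (PySem.Str.strip line))
-- _normalize_line_endings(content).split('\n')
def pvLines (content : String) : List String :=
  (PySem.Str.split? (PySem.Str.replace content "\r\n" "\n") "\n").getD []
def pvJoin (parts : List String) : String := PySem.Str.join "\n" parts
-- the body of A's for-loop; state = (blocks, current_block, in_block)
def pvAStep (st : List String × List String × Bool) (line : String) :
    List String × List String × Bool :=
  match st with
  | (blocks, current, inb) =>
    if pvIsBeg line then
      ((if inb && !current.isEmpty then blocks ++ [pvJoin current] else blocks), [line], true)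
    else if inb then
      if pvIsEnd line then
        (blocks ++ [pvJoin (current ++ [line])], ([] : List String), false)
      else
        (blocks, current ++ [line], true)
    else st
-- the trailing 'if in_block and current_block' flush
def pvAFinal (st : List String × List String × Bool) : List String :=
  match st with
  | (blocks, current, inb) => if inb && !current.isEmpty then blocks ++ [pvJoin current] else blocks

def split_vcard_blocks_py (content : String) : List String :=
  pvAFinal ((pvLines content).foldl pvAStep ([], [], false))

-- ===== PORT B =====
-- the inner while loop: collect lines until the next BEGIN (exclusive) or an END (inclusive)
def pvBTake : List String → List String
  | [] => []
  | l :: rest =>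
    if pvIsBeg l then []
    else if pvIsEnd l then [l]
    else l :: pvBTake rest
-- the outer for-loop over the line indices, transcribed as recursion on the line suffix
def pvBGo : List String → List String
  | [] => []
  | l :: rest =>
    if pvIsBeg l then pvJoin (l :: pvBTake rest) :: pvBGo rest else pvBGo rest

def split_vcard_blocks_py_alt (content : String) : List String :=
  pvBGo (pvLines content)

-- ===== PRECONDITION & SPEC =====
def Spec_split_vcard_blocks_py (content : String) (out : List String) : Prop := out = split_vcard_blocks_py_alt content
instance (content : String) (out : List String) : Decidable (Spec_split_vcard_blocks_py content out) := by unfold Spec_split_vcard_blocks_py; infer_instance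

-- ===== CLAIM (what is proved, stated in full; the proofs are below) =====
def Claim_equal_split_vcard_blocks_py : Prop := ∀ (content : String), Dom_split_vcard_blocks_py content → Spec_split_vcard_blocks_py content (split_vcard_blocks_py content)

-- ===== LEMMAS AND PROOFS =====

-- Invariant of A's fold, parametric in the line list, both loop states at once:
-- out of a block the remaining output is pvBGo; inside a block (nonempty current)
-- the current block completes as pvBTake and the rest is again pvBGo.
theorem pvA_fold_inv (lines : List String) :
    (∀ (blocks cur : List String),
        pvAFinal (lines.foldl pvAStep (blocks, cur, false)) = blocks ++ pvBGo lines)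
    ∧ (∀ (blocks current : List String), current ≠ [] →
        pvAFinal (lines.foldl pvAStep (blocks, current, true)) =
          blocks ++ pvJoin (current ++ pvBTake lines) :: pvBGo lines) := by
  induction lines with
  | nil =>
    refine ⟨fun blocks cur => by simp [pvAFinal, pvBGo], fun blocks current hc => ?_⟩
    simp [pvAFinal, pvBGo, pvBTake, List.isEmpty_eq_false_iff, hc]
  | cons l rest ih =>
    constructor
    · intro blocks cur
      by_cases hb : pvIsBeg l
      · have hs : pvAStep (blocks, cur, false) l = (blocks, [l], true) := by
          simp [pvAStep, hb]
        rw [List.foldl_cons, hs, ih.2 blocks [l] (by simp)]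
        simp [pvBGo, hb]
      · have hs : pvAStep (blocks, cur, false) l = (blocks, cur, false) := by
          simp [pvAStep, hb]
        rw [List.foldl_cons, hs, ih.1 blocks cur]
        simp [pvBGo, hb]
    · intro blocks current hc
      by_cases hb : pvIsBeg l
      · have hs : pvAStep (blocks, current, true) l = (blocks ++ [pvJoin current], [l], true) := by
          simp [pvAStep, hb, List.isEmpty_eq_false_iff, hc]
        rw [List.foldl_cons, hs, ih.2 (blocks ++ [pvJoin current]) [l] (by simp)]
        simp [pvBGo, pvBTake, hb]
      · by_cases he : pvIsEnd l
        · have hs : pvAStep (blocks, current, true) l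
              = (blocks ++ [pvJoin (current ++ [l])], ([] : List String), false) := by
            simp [pvAStep, hb, he]
          rw [List.foldl_cons, hs, ih.1]
          simp [pvBGo, pvBTake, hb, he]
        · have hs : pvAStep (blocks, current, true) l = (blocks, current ++ [l], true) := by
            simp [pvAStep, hb, he]
          rw [List.foldl_cons, hs, ih.2 blocks (current ++ [l]) (by simp)]
          simp [pvBGo, pvBTake, hb, he]

-- ===== VERDICT (by name: the statement is the Claim_ definition above) =====
theorem split_vcard_blocks_py_spec : Claim_equal_split_vcard_blocks_py := by
  intro content _
  unfold Spec_split_vcard_blocks_py split_vcard_blocks_py split_vcard_blocks_py_alt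
  simpa using (pvA_fold_inv (pvLines content)).1 [] []
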